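-- pv_equiv track=rewrite | github.com/miliar/Code_Jam_Webscraper | solutions_python/solutions_year16_round1_nr2/597.py | find_missing_numbers
-- ===== SOURCE A (Python) =====
-- def find_missing_numbers(ls):
-- 	seen = dict()
-- 	for num in ls:
-- 		if num in seen:
-- 			seen[num] += 1
-- 		else:
-- 			seen[num] = 1
-- 	result = list()
-- 	for num in seen.keys():
-- 		if seen[num]%2 == 1:
-- 			result.append(num)
-- 	return sorted(result)
-- ===== SOURCE B (Python) =====
-- def find_missing_numbers(ls):
-- 	odd = set()
-- 	for num in ls:
-- 		if num in odd:
-- 			odd.discard(num)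
-- 		else:
-- 			odd.add(num)
-- 	return sorted(odd)
-- ===== Notes on version B (the rewrite author's own statement) =====
-- stated objective: simpler
-- what changed: Replaces the count-dictionary plus second odd-count filtering pass by a single parity-toggle set (add if absent, discard if present) built in one pass, then sorted.
import Mathlib
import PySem

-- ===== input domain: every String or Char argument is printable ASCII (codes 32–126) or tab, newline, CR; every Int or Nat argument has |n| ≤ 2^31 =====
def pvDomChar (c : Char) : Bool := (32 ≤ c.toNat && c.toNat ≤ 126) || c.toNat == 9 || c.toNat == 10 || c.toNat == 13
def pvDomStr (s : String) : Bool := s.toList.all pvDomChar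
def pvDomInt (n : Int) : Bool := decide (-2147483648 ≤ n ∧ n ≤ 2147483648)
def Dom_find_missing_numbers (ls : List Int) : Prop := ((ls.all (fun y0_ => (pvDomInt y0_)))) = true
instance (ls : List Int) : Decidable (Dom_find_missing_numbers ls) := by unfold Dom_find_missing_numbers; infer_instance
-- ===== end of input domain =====

-- B replaces A's count-dictionary + second filtering pass by a single parity-toggle set built in one pass (simpler; same cost).

-- ===== PORT A =====
def find_missing_numbers (ls : List Int) : List Int :=
  let seen : PySem.Dict Int Int :=
    ls.foldl (fun d num =>
      if d.contains num then d.insert num (d.getD num 0 + 1)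
      else d.insert num 1) PySem.Dict.empty
  let result : List Int :=
    seen.keys.foldl (fun r num =>
      if PySem.Int.mod (seen.getD num 0) 2 == 1 then r ++ [num] else r) []
  PySem.List.sorted result (fun x => x) false

-- ===== PORT B =====
def find_missing_numbers_alt (ls : List Int) : List Int :=
  let odd : PySem.Set Int :=
    ls.foldl (fun s num =>
      if PySem.Set.contains s num then PySem.Set.discard s num
      else PySem.Set.add s num) PySem.Set.empty
  PySem.List.sorted odd (fun x => x) false

-- ===== PRECONDITION & SPEC =====
def Spec_find_missing_numbers (ls : List Int) (out : List Int) : Prop := out = find_missing_numbers_alt ls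
instance (ls : List Int) (out : List Int) : Decidable (Spec_find_missing_numbers ls out) := by unfold Spec_find_missing_numbers; infer_instance

-- ===== CLAIM (what is proved, stated in full; the proofs are below) =====
def Claim_equal_find_missing_numbers : Prop := ∀ (ls : List Int), Dom_find_missing_numbers ls → Spec_find_missing_numbers ls (find_missing_numbers ls)

-- ===== LEMMAS AND PROOFS =====

-- A's counting fold is Counter(ls)
theorem pv_seen_eq_counter (ls : List Int) :
    ls.foldl (fun d num =>
      if d.contains num then d.insert num (d.getD num 0 + 1)
      else d.insert num 1) PySem.Dict.empty = PySem.Dict.counter ls := by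
  have h : (fun (d : PySem.Dict Int Int) num =>
      if d.contains num then d.insert num (d.getD num 0 + 1)
      else d.insert num 1)
      = (fun d num => d.insert num (d.getD num 0 + 1)) := by
    funext d num
    by_cases h : d.contains num
    · simp [h]
    · have h' : d.contains num = false := by simpa using h
      rw [if_neg (by simp [h']), PySem.Dict.getD_of_not_contains d 0 h']
      norm_num
  rw [h, PySem.Dict.foldl_insert_getD_add_one_eq_counter]

-- B's toggle loop: membership = parity of the count (relative to the start set)
theorem pv_toggle_mem (ls : List Int) (s : PySem.Set Int) (x : Int) :
    (x ∈ ls.foldl (fun s num =>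
      if PySem.Set.contains s num then PySem.Set.discard s num
      else PySem.Set.add s num) s)
    ↔ ((x ∈ s ∧ ls.count x % 2 = 0) ∨ (x ∉ s ∧ ls.count x % 2 = 1)) := by
  induction ls generalizing s with
  | nil => simp
  | cons a t ih =>
    simp only [List.foldl_cons, ih, List.count_cons]
    by_cases hm : a ∈ s
    · have hc : PySem.Set.contains s a = true := (PySem.Set.contains_iff s a).2 hm
      by_cases hxa : x = a
      · subst hxa
        simp [hm, PySem.Set.mem_discard]
        omega
      · have hbeq : (a == x) = false := by simpa using fun h => hxa h.symm
        simp [hm, PySem.Set.mem_discard, hxa, hbeq]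
    · have hc : PySem.Set.contains s a = false := by
        by_contra h
        exact hm ((PySem.Set.contains_iff s a).1 (by simpa using h))
      by_cases hxa : x = a
      · subst hxa
        simp [hm]
        omega
      · have hbeq : (a == x) = false := by simpa using fun h => hxa h.symm
        simp [hm, hxa, hbeq]

theorem pv_toggle_nodup (ls : List Int) (s : PySem.Set Int) (h : s.Nodup) :
    (ls.foldl (fun s num =>
      if PySem.Set.contains s num then PySem.Set.discard s num
      else PySem.Set.add s num) s).Nodup := by
  induction ls generalizing s with
  | nil => simpa
  | cons a t ih =>
    simp only [List.foldl_cons]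
    by_cases hm : PySem.Set.contains s a
    · rw [if_pos hm]
      exact ih _ (PySem.Set.nodup_discard (s := s) (x := a) h)
    · rw [if_neg (by simpa using hm)]
      exact ih _ (PySem.Set.nodup_add (s := s) (x := a) h)

-- ===== VERDICT (by name: the statement is the Claim_ definition above) =====
theorem find_missing_numbers_spec : Claim_equal_find_missing_numbers := by
  intro ls _
  unfold Spec_find_missing_numbers find_missing_numbers find_missing_numbers_alt
  simp only [pv_seen_eq_counter]
  have hkeys := PySem.Dict.keys_counter (xs := ls)
  set p : Int → Bool := fun num => PySem.Int.mod ((PySem.Dict.counter ls).getD num 0) 2 == 1 with hp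
  have hfold : (PySem.Dict.counter ls).keys.foldl
      (fun r num => if p num then r ++ [num] else r) []
      = (PySem.Dict.counter ls).keys.filter p := by
    simpa using PySem.List.foldl_append_if p (fun x => x) (PySem.Dict.counter ls).keys []
  rw [hfold]
  apply PySem.List.sorted_eq_sorted_of_perm _ _ _ (fun a b h => h)
  rw [List.perm_ext_iff_of_nodup]
  · intro x
    rw [List.mem_filter, hkeys, PySem.Set.mem_ofList, pv_toggle_mem]
    have hc : ∀ v : Int, PySem.Int.mod ((PySem.Dict.counter ls).getD v 0) 2
        = ((ls.count v : Int)) % 2 := by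
      intro v
      rw [PySem.Dict.getD_counter]
      show ((ls.count v : Int)).fmod 2 = ((ls.count v : Int)) % 2
      rw [Int.fmod_eq_emod]
      simp
    simp only [hp, hc, beq_iff_eq]
    constructor
    · rintro ⟨hmem, hodd⟩
      refine Or.inr ⟨by simp, ?_⟩
      omega
    · rintro (⟨h, _⟩ | ⟨_, hodd⟩)
      · simp at h
      · have hx : x ∈ ls := by
          rw [← List.count_pos_iff]
          omega
        exact ⟨hx, by omega⟩
  · rw [hkeys]
    exact List.Nodup.filter _ (PySem.Set.nodup_ofList ls)
  · exact pv_toggle_nodup ls [] List.nodup_nil
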